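-- pv_equiv track=rewrite | github.com/AdrienDEBREUILLY/Decoupler | core/functional.py | get_first_and_last_room_for_cable
-- ===== SOURCE A (Python) =====
-- def get_first_and_last_room_for_cable(dict_ordered_room: dict, list_room_decopling: list):
--     """
--         Goal:
--         Args:
--         Return:
--     """
--     order_of_project = list()
--     for order in dict_ordered_room:
--         room = dict_ordered_room[order]
--         if room in list_room_decopling:
--             order_of_project.append(order)
--     if len(order_of_project) == 0:
--         return None, None
--     # order_de_projet_ordoned = list()
--     order_de_projet_ordoned = sorted(order_of_project)
--     # dict_ordered_room_ordoned = list()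
--     ordered_room_key_ordoned = sorted(dict_ordered_room.keys())
--     if order_de_projet_ordoned[0] == ordered_room_key_ordoned[0]:
--         first = dict_ordered_room[ordered_room_key_ordoned[0]]
--     else:
--         index = ordered_room_key_ordoned.index(order_de_projet_ordoned[0])
--         first = dict_ordered_room[ordered_room_key_ordoned[index - 1]]
--     if order_de_projet_ordoned[-1] == ordered_room_key_ordoned[-1]:
--         last = dict_ordered_room[ordered_room_key_ordoned[-1]]
--     else:
--         index = ordered_room_key_ordoned.index(order_de_projet_ordoned[-1])
--         last = dict_ordered_room[ordered_room_key_ordoned[index + 1]]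
--     return first, last
-- ===== SOURCE B (Python) =====
-- def get_first_and_last_room_for_cable(dict_ordered_room: dict, list_room_decopling: list):
--     items = sorted(dict_ordered_room.items(), key=lambda kv: kv[0])
--     decopling = set(list_room_decopling)
--     firstidx = None
--     lastidx = None
--     for i, (_, room) in enumerate(items):
--         if room in decopling:
--             if firstidx is None:
--                 firstidx = i
--             lastidx = i
--     if firstidx is None:
--         return None, None
--     first = items[firstidx - 1][1] if firstidx > 0 else items[firstidx][1]
--     last = items[lastidx + 1][1] if lastidx < len(items) - 1 else items[lastidx][1]
--     return first, last
-- ===== Notes on version B (the rewrite author's own statement) =====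
-- stated objective: faster
-- what changed: One pass over the once-sorted items records the first and last matched positions directly, replacing A's matched-key list, its separate sort, the separate sorted key list, the O(n) list membership inside the loop and both .index scans with set membership and simple neighbour indexing.
import Mathlib
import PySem

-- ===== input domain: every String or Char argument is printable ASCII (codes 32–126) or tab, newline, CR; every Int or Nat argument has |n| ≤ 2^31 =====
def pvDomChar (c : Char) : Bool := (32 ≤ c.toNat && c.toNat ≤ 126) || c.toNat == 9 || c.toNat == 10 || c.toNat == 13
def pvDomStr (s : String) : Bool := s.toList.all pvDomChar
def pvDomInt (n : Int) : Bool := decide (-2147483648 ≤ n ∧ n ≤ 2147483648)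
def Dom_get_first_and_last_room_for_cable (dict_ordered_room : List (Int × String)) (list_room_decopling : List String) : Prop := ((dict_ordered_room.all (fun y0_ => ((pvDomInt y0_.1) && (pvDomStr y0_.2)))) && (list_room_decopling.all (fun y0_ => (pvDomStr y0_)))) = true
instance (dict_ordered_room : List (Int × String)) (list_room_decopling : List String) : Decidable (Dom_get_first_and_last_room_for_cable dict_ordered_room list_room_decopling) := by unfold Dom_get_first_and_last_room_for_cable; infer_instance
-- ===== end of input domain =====

-- B replaces A's matched-key list, its sort, the separate sorted key list, the per-room list
-- membership and both .index scans by one pass over the once-sorted items with set membership,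
-- recording the first and last matched positions (objective: faster, measured).

-- ===== PORT A =====
def get_first_and_last_room_for_cable (dict_ordered_room : List (Int × String)) (list_room_decopling : List String) : Option String × Option String :=
  let d := PySem.Dict.ofList dict_ordered_room
  let order_of_project := d.keys.foldl (fun acc order =>
      if d.getD order "" ∈ list_room_decopling then acc ++ [order] else acc) []
  if order_of_project.length = 0 then (none, none)
  else
    let op := PySem.List.sorted order_of_project (fun x => x) false
    let ks := PySem.List.sorted d.keys (fun x => x) false
    let first :=
      if PySem.List.pyGetD op 0 0 = PySem.List.pyGetD ks 0 0 then
        d.getD (PySem.List.pyGetD ks 0 0) ""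
      else
        let index := (PySem.List.index? ks (PySem.List.pyGetD op 0 0)).getD 0
        d.getD (PySem.List.pyGetD ks ((index : Int) - 1) 0) ""
    let last :=
      if PySem.List.pyGetD op (-1) 0 = PySem.List.pyGetD ks (-1) 0 then
        d.getD (PySem.List.pyGetD ks (-1) 0) ""
      else
        let index := (PySem.List.index? ks (PySem.List.pyGetD op (-1) 0)).getD 0
        d.getD (PySem.List.pyGetD ks ((index : Int) + 1) 0) ""
    (some first, some last)

-- ===== PORT B =====
def get_first_and_last_room_for_cable_alt (dict_ordered_room : List (Int × String)) (list_room_decopling : List String) : Option String × Option String :=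
  let items := PySem.List.sorted (PySem.Dict.ofList dict_ordered_room).items (fun kv => kv.1) false
  let decopling := PySem.Set.ofList list_room_decopling
  let fl := (PySem.List.enumerate items).foldl
      (fun (fl : Option Int × Option Int) ik =>
        if PySem.Set.contains decopling ik.2.2 then (some (fl.1.getD ik.1), some ik.1) else fl)
      (none, none)
  match fl.1, fl.2 with
  | some firstidx, some lastidx =>
      (some (if 0 < firstidx then (PySem.List.pyGetD items (firstidx - 1) (0, "")).2
             else (PySem.List.pyGetD items firstidx (0, "")).2),
       some (if lastidx < (items.length : Int) - 1 then (PySem.List.pyGetD items (lastidx + 1) (0, "")).2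
             else (PySem.List.pyGetD items lastidx (0, "")).2))
  | _, _ => (none, none)

-- ===== PRECONDITION & SPEC =====
def Spec_get_first_and_last_room_for_cable (dict_ordered_room : List (Int × String)) (list_room_decopling : List String) (out : Option String × Option String) : Prop := out = get_first_and_last_room_for_cable_alt dict_ordered_room list_room_decopling
instance (dict_ordered_room : List (Int × String)) (list_room_decopling : List String) (out : Option String × Option String) : Decidable (Spec_get_first_and_last_room_for_cable dict_ordered_room list_room_decopling out) := by unfold Spec_get_first_and_last_room_for_cable; infer_instance

-- ===== CLAIM (what is proved, stated in full; the proofs are below) =====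
def Claim_equal_get_first_and_last_room_for_cable : Prop := ∀ (dict_ordered_room : List (Int × String)) (list_room_decopling : List String), Dom_get_first_and_last_room_for_cable dict_ordered_room list_room_decopling → Spec_get_first_and_last_room_for_cable dict_ordered_room list_room_decopling (get_first_and_last_room_for_cable dict_ordered_room list_room_decopling)


-- ===== LEMMAS AND PROOFS =====

/-- The membership predicate B uses on sorted items. -/
def pvQ (L : List String) (kv : Int × String) : Bool := decide (kv.2 ∈ L)

/-- Index of the first matching element (recursive reading of B's loop). -/
def pvFirst (L : List String) : List (Int × String) → Int → Option Int
  | [], _ => none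
  | kv :: t, s => if kv.2 ∈ L then some s else pvFirst L t (s + 1)

/-- Index of the last matching element (recursive reading of B's loop). -/
def pvLast (L : List String) : List (Int × String) → Int → Option Int
  | [], _ => none
  | kv :: t, s =>
      match pvLast L t (s + 1) with
      | some r => some r
      | none => if kv.2 ∈ L then some s else none

theorem pv_contains_eq (L : List String) (v : String) :
    PySem.Set.contains (PySem.Set.ofList L) v = decide (v ∈ L) := by
  simp [PySem.Set.contains, PySem.Set.mem_ofList]

theorem pv_fold_eq (L : List String) (items : List (Int × String)) : ∀ (s : Int) (a b : Option Int),
    (PySem.List.enumerate items s).foldl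
      (fun (fl : Option Int × Option Int) ik =>
        if PySem.Set.contains (PySem.Set.ofList L) ik.2.2 then (some (fl.1.getD ik.1), some ik.1) else fl)
      (a, b)
    = (a.or (pvFirst L items s), (pvLast L items s).or b) := by
  induction items with
  | nil =>
      intro s a b
      simp [PySem.List.enumerate, pvFirst, pvLast]
  | cons kv t ih =>
      intro s a b
      rw [PySem.List.enumerate_cons, List.foldl_cons]
      simp only [pv_contains_eq] at ih ⊢
      by_cases h : kv.2 ∈ L
      · rw [if_pos (by simp [h])]
        rw [ih]
        cases a with
        | none =>
            simp only [pvFirst, pvLast, h, if_true, Option.getD_none, Option.none_or, Option.some_or]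
            cases hpl : pvLast L t (s + 1) <;> simp
        | some v0 =>
            simp only [pvFirst, pvLast, h, if_true, Option.getD_some, Option.some_or]
            cases hpl : pvLast L t (s + 1) <;> simp
      · rw [if_neg (by simp [h])]
        rw [ih]
        simp only [pvFirst, pvLast, h, if_false]
        cases hpl : pvLast L t (s + 1) <;> simp

theorem pvFirst_eq_none (L : List String) (l : List (Int × String))
    (h : ∀ kv ∈ l, kv.2 ∉ L) : ∀ s, pvFirst L l s = none := by
  induction l with
  | nil => intro s; rfl
  | cons kv t ih =>
      intro s
      simp only [pvFirst, h kv (List.mem_cons_self), if_false]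
      exact ih (fun kv hm => h kv (List.mem_cons_of_mem _ hm)) (s + 1)

theorem pvLast_eq_none (L : List String) (l : List (Int × String))
    (h : ∀ kv ∈ l, kv.2 ∉ L) : ∀ s, pvLast L l s = none := by
  induction l with
  | nil => intro s; rfl
  | cons kv t ih =>
      intro s
      simp only [pvLast, ih (fun kv hm => h kv (List.mem_cons_of_mem _ hm)) (s + 1),
        h kv (List.mem_cons_self), if_false]

theorem pvFirst_split (L : List String) (pre : List (Int × String)) (x : Int × String)
    (suf : List (Int × String)) (hpre : ∀ kv ∈ pre, kv.2 ∉ L) (hx : x.2 ∈ L) :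
    ∀ s, pvFirst L (pre ++ x :: suf) s = some (s + pre.length) := by
  induction pre with
  | nil => intro s; simp [pvFirst, hx]
  | cons p ps ih =>
      intro s
      simp only [List.cons_append, pvFirst, hpre p (List.mem_cons_self), if_false]
      rw [ih (fun kv hm => hpre kv (List.mem_cons_of_mem _ hm)) (s + 1)]
      congr 1
      simp only [List.length_cons]
      push_cast
      ring

theorem pvLast_split (L : List String) (pre : List (Int × String)) (y : Int × String)
    (suf : List (Int × String)) (hy : y.2 ∈ L) (hsuf : ∀ kv ∈ suf, kv.2 ∉ L) :
    ∀ s, pvLast L (pre ++ y :: suf) s = some (s + pre.length) := by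
  induction pre with
  | nil =>
      intro s
      simp only [List.nil_append, pvLast, pvLast_eq_none L suf hsuf (s + 1), hy, if_true,
        List.length_nil]
      norm_num
  | cons p ps ih =>
      intro s
      simp only [List.cons_append, pvLast]
      rw [ih (s + 1)]
      simp only [List.length_cons]
      congr 1
      push_cast
      ring

theorem pv_exists_first (L : List String) (l : List (Int × String))
    (h : l.filter (pvQ L) ≠ []) :
    ∃ pre x suf, l = pre ++ x :: suf ∧ (∀ kv ∈ pre, kv.2 ∉ L) ∧ x.2 ∈ L := by
  induction l with
  | nil => simp at h
  | cons kv t ih =>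
      by_cases hk : kv.2 ∈ L
      · exact ⟨[], kv, t, rfl, by simp, hk⟩
      · have h' : t.filter (pvQ L) ≠ [] := by
          simpa [List.filter_cons, pvQ, hk] using h
        obtain ⟨pre, x, suf, hsp, hpre, hx⟩ := ih h'
        refine ⟨kv :: pre, x, suf, by rw [hsp, List.cons_append], ?_, hx⟩
        intro kv' hm
        rcases List.mem_cons.mp hm with rfl | hm'
        · exact hk
        · exact hpre kv' hm'

theorem pv_exists_last (L : List String) (l : List (Int × String))
    (h : l.filter (pvQ L) ≠ []) :
    ∃ pre y suf, l = pre ++ y :: suf ∧ y.2 ∈ L ∧ ∀ kv ∈ suf, kv.2 ∉ L := by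
  induction l with
  | nil => simp at h
  | cons kv t ih =>
      by_cases ht : t.filter (pvQ L) = []
      · have hk : kv.2 ∈ L := by
          by_contra hk
          apply h
          simp [pvQ, hk, ht]
        refine ⟨[], kv, t, rfl, hk, ?_⟩
        intro kv' hm
        have := List.filter_eq_nil_iff.mp ht kv' hm
        simpa [pvQ] using this
      · obtain ⟨pre, y, suf, hsp, hy, hsuf⟩ := ih ht
        exact ⟨kv :: pre, y, suf, by rw [hsp, List.cons_append], hy, hsuf⟩

theorem pv_pairwise_lt {l : List Int} (h1 : l.Pairwise (fun a b => a ≤ b)) (h2 : l.Nodup) :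
    l.Pairwise (fun a b => a < b) :=
  (h1.and h2).imp (fun hab => lt_of_le_of_ne hab.1 hab.2)

theorem pv_foldA (dd : PySem.Dict Int String) (L : List String) (l : List Int) :
    ∀ acc, l.foldl (fun acc order => if dd.getD order "" ∈ L then acc ++ [order] else acc) acc
      = acc ++ l.filter (fun k => decide (dd.getD k "" ∈ L)) := by
  induction l with
  | nil => intro acc; simp
  | cons k t ih =>
      intro acc
      by_cases hk : dd.getD k "" ∈ L
      · simp only [List.foldl_cons, hk, if_true, List.filter_cons, decide_true]
        rw [ih (acc ++ [k])]
        simp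
      · simp only [List.foldl_cons, hk, if_false, List.filter_cons, decide_false]
        exact ih acc


theorem pv_getD_append_left {α : Type} (pre suf : List α) (i : Nat) (h : i < pre.length) (dv : α) :
    (pre ++ suf).getD i dv = pre[i] := by
  rw [List.getD_eq_getElem?_getD, List.getElem?_append_left h, List.getElem?_eq_getElem h,
    Option.getD_some]

theorem pv_getD_append_mid {α : Type} (pre : List α) (x : α) (suf : List α) (dv : α) :
    (pre ++ x :: suf).getD pre.length dv = x := by
  rw [List.getD_eq_getElem?_getD, List.getElem?_append_right (le_refl _), Nat.sub_self]
  rfl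

theorem pv_getD_append_mid1 {α : Type} (pre : List α) (x s0 : α) (suf : List α) (dv : α) :
    (pre ++ x :: s0 :: suf).getD (pre.length + 1) dv = s0 := by
  rw [List.getD_eq_getElem?_getD, List.getElem?_append_right (Nat.le_add_right _ _),
    Nat.add_sub_cancel_left]
  rfl

theorem pv_pyGetD_neg_one_getLast {α : Type} (l : List α) (dv : α) :
    PySem.List.pyGetD l (-1) dv = l.getLast?.getD dv := by
  cases l using List.reverseRecOn with
  | nil => simp [PySem.List.pyGetD, PySem.List.pyGet?]
  | append_singleton xs x =>
      rw [PySem.List.pyGetD_neg_one_append_singleton, List.getLast?_concat, Option.getD_some]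

theorem pv_getLast?_append_cons {α : Type} (l1 : List α) (a : α) (l2 : List α) :
    (l1 ++ a :: l2).getLast? = (a :: l2).getLast? := by
  induction l1 with
  | nil => rfl
  | cons b t ih =>
      obtain ⟨c, cs, hccs⟩ : ∃ c cs, t ++ a :: l2 = c :: cs := by
        cases h : t ++ a :: l2 with
        | nil => exact absurd h (by simp)
        | cons c cs => exact ⟨c, cs, rfl⟩
      calc (b :: t ++ a :: l2).getLast? = (b :: c :: cs).getLast? := by
              rw [List.cons_append, hccs]
        _ = (c :: cs).getLast? := List.getLast?_cons_cons
        _ = (t ++ a :: l2).getLast? := by rw [hccs]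
        _ = (a :: l2).getLast? := ih

theorem pv_mem_of_getLast? {α : Type} {l : List α} {a : α} (h : l.getLast? = some a) : a ∈ l := by
  cases l using List.reverseRecOn with
  | nil => simp at h
  | append_singleton t x =>
      rw [List.getLast?_concat] at h
      cases h
      simp

theorem pv_main (d : List (Int × String)) (L : List String) :
    get_first_and_last_room_for_cable d L = get_first_and_last_room_for_cable_alt d L := by
  simp only [get_first_and_last_room_for_cable, get_first_and_last_room_for_cable_alt]
  rw [pv_fold_eq L, pv_foldA (PySem.Dict.ofList d) L]
  have hnd : (PySem.Dict.ofList d).keys.Nodup := PySem.Dict.nodup_keys_ofList d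
  set dd := PySem.Dict.ofList d with hdd
  set pb : Int → Bool := fun k => decide (dd.getD k "" ∈ L) with hpb
  set items := PySem.List.sorted dd.items (fun kv => kv.1) with hitems
  set ks := PySem.List.sorted dd.keys (fun x => x) with hksdef
  simp only [List.nil_append, Option.none_or, Option.or_none]
  have hpermI : items.Perm dd.items := PySem.List.sorted_perm _ _ _
  have hkeysdef : dd.keys = dd.items.map (fun kv => kv.1) := rfl
  have hpermK : ks.Perm dd.keys := PySem.List.sorted_perm _ _ _
  have hksnd : ks.Nodup := hpermK.nodup_iff.mpr hnd
  have hksle : ks.Pairwise (fun a b => a ≤ b) := by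
    have h := PySem.List.sorted_pairwise dd.keys (fun x => x)
    simpa using h
  have hkslt : ks.Pairwise (fun a b => a < b) := pv_pairwise_lt hksle hksnd
  have hmapperm : (items.map (fun kv => kv.1)).Perm dd.keys := by
    rw [hkeysdef]; exact hpermI.map _
  have hmapnd : (items.map (fun kv => kv.1)).Nodup := hmapperm.nodup_iff.mpr hnd
  have hmaple : (items.map (fun kv => kv.1)).Pairwise (fun a b => a ≤ b) := by
    have h := PySem.List.sorted_map_key_pairwise dd.items (fun kv => kv.1)
    simpa using h
  have hmap : items.map (fun kv => kv.1) = ks :=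
    (PySem.List.sorted_eq_of_perm_of_pairwise_lt dd.keys _ (fun x => x) hmapperm
      (by simpa using pv_pairwise_lt hmaple hmapnd)).symm
  have hlook : ∀ kv ∈ items, dd.getD kv.1 "" = kv.2 := by
    intro kv hm
    have hmem : (kv.1, kv.2) ∈ dd.items := by simpa using hpermI.mem_iff.mp hm
    exact PySem.Dict.getD_of_mem_items dd hmem hnd ""
  have hfilter : ks.filter pb = (items.filter (pvQ L)).map (fun kv => kv.1) := by
    rw [← hmap, List.filter_map]
    congr 1
    apply List.filter_congr
    intro kv hm
    simp [hpb, pvQ, Function.comp, hlook kv hm]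
  have hop : PySem.List.sorted (dd.keys.filter pb) (fun x => x) = ks.filter pb :=
    PySem.List.sorted_eq_of_perm_of_pairwise_lt _ _ _ (hpermK.filter pb)
      (by simpa using hkslt.sublist List.filter_sublist)
  rw [hop]
  by_cases hemp : items.filter (pvQ L) = []
  · have hke : dd.keys.filter pb = [] := by
      have hp := hpermK.filter pb
      rw [show ks.filter pb = [] from by rw [hfilter, hemp]; rfl] at hp
      exact hp.symm.eq_nil
    have hfe : ∀ kv ∈ items, kv.2 ∉ L := by
      intro kv hm
      have h := List.filter_eq_nil_iff.mp hemp kv hm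
      simpa [pvQ] using h
    simp [hke, pvFirst_eq_none L items hfe 0, pvLast_eq_none L items hfe 0]
  · obtain ⟨pre, x, suf, hsp, hpre, hx⟩ := pv_exists_first L items hemp
    obtain ⟨pre', y, suf', hsp', hy, hsuf'⟩ := pv_exists_last L items hemp
    have hne : ¬ (dd.keys.filter pb).length = 0 := by
      simp only [List.length_eq_zero_iff]
      intro h0
      apply hemp
      have hp := hpermK.filter pb
      rw [h0] at hp
      have h1 : ks.filter pb = [] := hp.eq_nil
      rw [hfilter] at h1
      exact List.map_eq_nil_iff.mp h1
    rw [if_neg hne]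
    have hf : pvFirst L items 0 = some ((pre.length : Int)) := by
      rw [hsp, pvFirst_split L pre x suf hpre hx 0]; norm_num
    have hl : pvLast L items 0 = some ((pre'.length : Int)) := by
      rw [hsp', pvLast_split L pre' y suf' hy hsuf' 0]; norm_num
    rw [hf, hl]
    have hprefil : pre.filter (pvQ L) = [] :=
      List.filter_eq_nil_iff.mpr (fun kv hm => by simp [pvQ, hpre kv hm])
    have hsuffil : suf'.filter (pvQ L) = [] :=
      List.filter_eq_nil_iff.mpr (fun kv hm => by simp [pvQ, hsuf' kv hm])
    have hF1 : items.filter (pvQ L) = x :: suf.filter (pvQ L) := by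
      rw [hsp, List.filter_append, hprefil, List.nil_append,
        List.filter_cons_of_pos (by simp [pvQ, hx])]
    have hF2 : items.filter (pvQ L) = pre'.filter (pvQ L) ++ [y] := by
      rw [hsp', List.filter_append, List.filter_cons_of_pos (by simp [pvQ, hy]), hsuffil]
    have hkssp : ks = pre.map (fun kv => kv.1) ++ x.1 :: suf.map (fun kv => kv.1) := by
      rw [← hmap, hsp]; simp
    have hkssp' : ks = pre'.map (fun kv => kv.1) ++ y.1 :: suf'.map (fun kv => kv.1) := by
      rw [← hmap, hsp']; simp
    have hop0 : PySem.List.pyGetD (ks.filter pb) 0 0 = x.1 := by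
      rw [hfilter, hF1, List.map_cons, PySem.List.pyGetD_zero_cons]
    have hopl : PySem.List.pyGetD (ks.filter pb) (-1) 0 = y.1 := by
      rw [hfilter, hF2, List.map_append, List.map_singleton,
        PySem.List.pyGetD_neg_one_append_singleton]
    rw [hop0, hopl]
    have hltpre : ∀ k ∈ pre.map (fun kv => kv.1), k < x.1 := by
      have h := hkslt
      rw [hkssp, List.pairwise_append] at h
      exact fun k hk => h.2.2 k hk x.1 List.mem_cons_self
    have hltpre' : ∀ k ∈ pre'.map (fun kv => kv.1), k < y.1 := by
      have h := hkslt
      rw [hkssp', List.pairwise_append] at h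
      exact fun k hk => h.2.2 k hk y.1 List.mem_cons_self
    have hltsuf' : ∀ k ∈ suf'.map (fun kv => kv.1), y.1 < k := by
      have h := hkslt
      rw [hkssp', List.pairwise_append, List.pairwise_cons] at h
      exact h.2.1.1
    simp only [Prod.mk.injEq]
    constructor
    · -- FIRST component
      cases pre with
      | nil =>
          have hks0 : ks = x.1 :: suf.map (fun kv => kv.1) := by simpa using hkssp
          have hit0 : items = x :: suf := by simpa using hsp
          rw [hks0, PySem.List.pyGetD_zero_cons, if_pos rfl]
          have hxmem : x ∈ items := by rw [hit0]; exact List.mem_cons_self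
          rw [hlook x hxmem]
          have h0 : ((List.length ([] : List (Int × String)) : Nat) : Int) = 0 := by simp
          rw [h0, if_neg (lt_irrefl 0), hit0, PySem.List.pyGetD_zero_cons]
      | cons p ps =>
          have hks0 : PySem.List.pyGetD ks 0 0 = p.1 := by
            rw [hkssp, List.map_cons, List.cons_append, PySem.List.pyGetD_zero_cons]
          rw [hks0]
          have hplt : p.1 < x.1 := hltpre p.1 (by simp)
          rw [if_neg (ne_of_gt hplt)]
          have hnotin : x.1 ∉ (p :: ps).map (fun kv => kv.1) := by
            intro hm
            exact lt_irrefl _ (hltpre _ hm)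
          have hidx : PySem.List.index? ks x.1 = some ((p :: ps).map (fun kv => kv.1)).length :=
            (PySem.List.index?_eq_some_iff ks x.1 _).mpr
              ⟨(p :: ps).map (fun kv => kv.1), suf.map (fun kv => kv.1), hkssp, rfl, hnotin⟩
          rw [hidx, Option.getD_some]
          have hlm : ((p :: ps).map (fun kv => kv.1)).length = (p :: ps).length := by simp
          rw [hlm]
          have hcast : (((p :: ps).length : Nat) : Int) - 1 = (((p :: ps).length - 1 : Nat) : Int) := by
            simp
          have hpos : (0 : Int) < (((p :: ps).length : Nat) : Int) := by
            exact_mod_cast Nat.succ_pos ps.length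
          rw [hcast, if_pos hpos]
          simp only [PySem.List.pyGetD_natCast]
          have hn : (p :: ps).length - 1 < (p :: ps).length := by simp
          have h1 : ks.getD ((p :: ps).length - 1) 0 = ((p :: ps)[(p :: ps).length - 1]'hn).1 := by
            rw [hkssp, pv_getD_append_left _ _ _ (by simp) 0, List.getElem_map]
          have h2 : items.getD ((p :: ps).length - 1) (0, "") = (p :: ps)[(p :: ps).length - 1]'hn := by
            rw [hsp, pv_getD_append_left _ _ _ hn]
          have hmem : (p :: ps)[(p :: ps).length - 1]'hn ∈ items := by
            rw [hsp]; exact List.mem_append_left _ (List.getElem_mem hn)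
          rw [h1, h2, hlook _ hmem]
    · -- LAST component
      cases suf' with
      | nil =>
          have hksl : ks = pre'.map (fun kv => kv.1) ++ [y.1] := by simpa using hkssp'
          have hit : items = pre' ++ [y] := by simpa using hsp'
          rw [hksl, PySem.List.pyGetD_neg_one_append_singleton, if_pos rfl]
          have hymem : y ∈ items := by rw [hit]; simp
          rw [hlook y hymem]
          have hlen : items.length = pre'.length + 1 := by rw [hit]; simp
          rw [if_neg (by rw [hlen]; push_cast; omega)]
          rw [PySem.List.pyGetD_natCast, hit, pv_getD_append_mid]
      | cons s0 ss =>
          rw [pv_pyGetD_neg_one_getLast]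
          obtain ⟨zk, hzk⟩ : ∃ zk, ks.getLast? = some zk := by
            rw [hkssp']
            cases h : (pre'.map (fun kv => kv.1) ++ y.1 :: (s0 :: ss).map (fun kv => kv.1)).getLast? with
            | none => simp at h
            | some z => exact ⟨z, rfl⟩
          have hzmem : zk ∈ (s0 :: ss).map (fun kv => kv.1) := by
            rw [hkssp', pv_getLast?_append_cons, List.map_cons, List.getLast?_cons_cons] at hzk
            have h := pv_mem_of_getLast? hzk
            simp only [List.map_cons]
            exact h
          have hy_lt : y.1 < zk := hltsuf' zk hzmem
          rw [hzk, Option.getD_some, if_neg (ne_of_lt hy_lt)]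
          have hnotin' : y.1 ∉ pre'.map (fun kv => kv.1) := by
            intro hm
            exact lt_irrefl _ (hltpre' _ hm)
          have hidx' : PySem.List.index? ks y.1 = some (pre'.map (fun kv => kv.1)).length :=
            (PySem.List.index?_eq_some_iff ks y.1 _).mpr
              ⟨pre'.map (fun kv => kv.1), (s0 :: ss).map (fun kv => kv.1), hkssp', rfl, hnotin'⟩
          rw [hidx', Option.getD_some]
          have hlm' : (pre'.map (fun kv => kv.1)).length = pre'.length := by simp
          rw [hlm']
          have hcast' : ((pre'.length : Nat) : Int) + 1 = ((pre'.length + 1 : Nat) : Int) := by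
            push_cast; ring
          rw [hcast']
          simp only [PySem.List.pyGetD_natCast]
          have h1 : ks.getD (pre'.length + 1) 0 = s0.1 := by
            have h := pv_getD_append_mid1 (pre'.map (fun kv => kv.1)) y.1 s0.1
              (ss.map (fun kv => kv.1)) 0
            rw [hkssp', List.map_cons]
            simp
          have hs0mem : s0 ∈ items := by rw [hsp']; simp
          rw [h1, hlook s0 hs0mem]
          have hlen : items.length = pre'.length + 1 + (ss.length + 1) := by
            rw [hsp']; simp [List.length_append]; ring
          rw [if_pos (by rw [hlen]; push_cast; omega)]
          rw [hsp', pv_getD_append_mid1]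

-- ===== VERDICT (by name: the statement is the Claim_ definition above) =====
theorem get_first_and_last_room_for_cable_spec : Claim_equal_get_first_and_last_room_for_cable := by
  intro d L _
  unfold Spec_get_first_and_last_room_for_cable
  exact pv_main d L
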